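-- pv_equiv track=rewrite | github.com/ViridisWolf/AdventOfCode | y2022/day17.py | collision
-- ===== SOURCE A (Python) =====
-- WALL_LEFT = 0
--
-- WALL_RIGHT = 8
--
-- def collision(piece, board, dx, dy):
--     """
--     Return true if there would be a collision in that direction.
--
--     :param piece: Dict of piece elements.
--     :param board: Set of static points.
--     :param dx: Movement right.
--     :param dy: Movement down.
--     :return: If there would be a collision.
--     """
--
--     shifted = offset_piece(piece, dx, dy)
--
--     # Check if hitting wall.
--     shifted.sort()
--     if shifted[0][0] <= WALL_LEFT or shifted[-1][0] >= WALL_RIGHT: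
--         return True
--     # Check if hitting static pieces.
--     if board.intersection(set(shifted)):
--         return True
--     # Check if hitting the floor.
--     if min([y for (x, y) in shifted]) <= 0:
--         return True
--
--     return False
--
-- def offset_piece(piece, dx, dy):
--     """ Return the piece list with shifted by the offset. """
--     return [(x+dx, y+dy) for (x, y) in piece]
-- ===== SOURCE B (Python) =====
-- WALL_LEFT = 0
--
-- WALL_RIGHT = 8
--
-- def collision(piece, board, dx, dy):
--     for (x, y) in piece:
--         px = x + dx
--         py = y + dy
--         if px <= WALL_LEFT or px >= WALL_RIGHT or py <= 0 or (px, py) in board: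
--             return True
--     return False
-- ===== Notes on version B (the rewrite author's own statement) =====
-- stated objective: simpler
-- what changed: One short-circuiting pass over the piece cells testing wall, floor and board membership per cell, replacing A's build-list + in-place sort + set intersection + separate min-scan.
import Mathlib
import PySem

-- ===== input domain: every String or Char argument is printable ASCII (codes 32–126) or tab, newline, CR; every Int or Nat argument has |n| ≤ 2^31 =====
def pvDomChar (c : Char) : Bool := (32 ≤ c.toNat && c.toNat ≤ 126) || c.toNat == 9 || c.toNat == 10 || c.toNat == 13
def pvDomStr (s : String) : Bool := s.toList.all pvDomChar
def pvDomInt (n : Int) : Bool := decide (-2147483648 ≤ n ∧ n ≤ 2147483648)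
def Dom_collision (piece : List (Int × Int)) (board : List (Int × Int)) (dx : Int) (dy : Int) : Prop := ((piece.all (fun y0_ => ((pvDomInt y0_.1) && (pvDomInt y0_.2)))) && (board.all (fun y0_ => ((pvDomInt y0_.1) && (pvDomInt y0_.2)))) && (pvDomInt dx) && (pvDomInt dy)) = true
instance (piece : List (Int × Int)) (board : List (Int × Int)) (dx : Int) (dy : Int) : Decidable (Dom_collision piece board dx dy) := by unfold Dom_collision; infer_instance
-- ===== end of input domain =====

-- B replaces A's build-list + sort + set-intersection + min-scan by one short-circuiting
-- pass over the piece cells (objective: simpler).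

-- ===== PORT A =====
-- offset_piece(piece, dx, dy)
def offsetPiece (piece : List (Int × Int)) (dx : Int) (dy : Int) : List (Int × Int) :=
  piece.map (fun p => (p.1 + dx, p.2 + dy))

def collision (piece : List (Int × Int)) (board : List (Int × Int)) (dx : Int) (dy : Int) : Bool :=
  let shifted0 := offsetPiece piece dx dy
  -- shifted.sort(): Python sorts the tuples lexicographically
  let shifted := PySem.List.sorted2 shifted0 Prod.fst Prod.snd
  -- shifted[0][0] / shifted[-1][0]; none = IndexError on an empty piece (excluded by Pre_)
  match PySem.List.pyGet? shifted 0, PySem.List.pyGet? shifted (-1) with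
  | some first, some last =>
    if first.1 ≤ 0 ∨ last.1 ≥ 8 then true
    else if PySem.Set.inter board (PySem.Set.ofList shifted) ≠ [] then true
    else
      match PySem.List.min? (shifted.map (fun p => p.2)) (fun y => y) with
      | some m => if m ≤ 0 then true else false
      | none => false
  | _, _ => false

-- ===== PORT B =====
def collision_alt (piece : List (Int × Int)) (board : List (Int × Int)) (dx : Int) (dy : Int) : Bool :=
  piece.any (fun p =>
    decide (p.1 + dx ≤ 0) || decide (p.1 + dx ≥ 8) || decide (p.2 + dy ≤ 0) ||
      board.contains (p.1 + dx, p.2 + dy))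

-- ===== PRECONDITION & SPEC =====
-- Pre_ excludes only the empty piece, on which Python A raises IndexError at shifted[0][0] (B returns False there).
def Pre_collision (piece : List (Int × Int)) (board : List (Int × Int)) (dx : Int) (dy : Int) : Prop :=
  piece ≠ []
instance (piece : List (Int × Int)) (board : List (Int × Int)) (dx : Int) (dy : Int) : Decidable (Pre_collision piece board dx dy) := by unfold Pre_collision; infer_instance

def pvWitness_collision : (List (Int × Int)) × (List (Int × Int)) × Int × Int :=
  ([(3, 5)], [(1, 1)], 1, -1)

def Spec_collision (piece : List (Int × Int)) (board : List (Int × Int)) (dx : Int) (dy : Int) (out : Bool) : Prop := out = collision_alt piece board dx dy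
instance (piece : List (Int × Int)) (board : List (Int × Int)) (dx : Int) (dy : Int) (out : Bool) : Decidable (Spec_collision piece board dx dy out) := by unfold Spec_collision; infer_instance

-- ===== CLAIM (what is proved, stated in full; the proofs are below) =====
def Claim_equal_collision : Prop := ∀ (piece : List (Int × Int)) (board : List (Int × Int)) (dx : Int) (dy : Int), Dom_collision piece board dx dy → Pre_collision piece board dx dy → Spec_collision piece board dx dy (collision piece board dx dy)

-- ===== LEMMAS AND PROOFS =====

-- the lexicographic "before" predicate Python's tuple sort uses (as sorted2 unfolds to)
def lexLt (a b : Int × Int) : Bool :=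
  decide (a.1 < b.1) || !decide (b.1 < a.1) && decide (a.2 < b.2)

lemma insertBy_lexLt_pairwise_fst (x : Int × Int) (ys : List (Int × Int))
    (h : ys.Pairwise (fun a b => a.1 ≤ b.1)) :
    (PySem.List.insertBy lexLt x ys).Pairwise (fun a b => a.1 ≤ b.1) := by
  induction ys with
  | nil => simp [PySem.List.insertBy]
  | cons y ys ih =>
    rcases List.pairwise_cons.mp h with ⟨hy, hys⟩
    by_cases hb : lexLt x y = true
    · have hxy : x.1 ≤ y.1 := by
        simp [lexLt] at hb; omega
      simp only [PySem.List.insertBy, hb, if_true]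
      refine List.pairwise_cons.mpr ⟨?_, h⟩
      intro z hz
      rcases List.mem_cons.mp hz with rfl | hz
      · exact hxy
      · exact le_trans hxy (hy z hz)
    · have hyx : y.1 ≤ x.1 := by
        simp [lexLt] at hb; omega
      simp only [PySem.List.insertBy, hb]
      refine List.pairwise_cons.mpr ⟨?_, ih hys⟩
      intro z hz
      rcases (PySem.List.insertBy_mem_iff lexLt x z ys).mp hz with rfl | hz
      · exact hyx
      · exact hy z hz

lemma foldl_insertBy_lexLt_pairwise_fst (xs acc : List (Int × Int))
    (h : acc.Pairwise (fun a b => a.1 ≤ b.1)) :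
    (xs.foldl (fun acc x => PySem.List.insertBy lexLt x acc) acc).Pairwise
      (fun a b => a.1 ≤ b.1) := by
  induction xs generalizing acc with
  | nil => exact h
  | cons x xs ih => exact ih _ (insertBy_lexLt_pairwise_fst x acc h)

lemma sorted2_fst_pairwise (xs : List (Int × Int)) :
    (PySem.List.sorted2 xs Prod.fst Prod.snd).Pairwise (fun a b => a.1 ≤ b.1) := by
  have heq : PySem.List.sorted2 xs Prod.fst Prod.snd =
      xs.foldl (fun acc x => PySem.List.insertBy lexLt x acc) [] := by
    unfold PySem.List.sorted2 lexLt
    rfl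
  rw [heq]
  exact foldl_insertBy_lexLt_pairwise_fst xs [] (by simp)

lemma sorted2_fst_perm (xs : List (Int × Int)) :
    (PySem.List.sorted2 xs Prod.fst Prod.snd).Perm xs :=
  PySem.List.sorted2_perm xs Prod.fst Prod.snd false

-- the single per-cell test B applies, as a Prop
def cellHit (board : List (Int × Int)) (q : Int × Int) : Prop :=
  q.1 ≤ 0 ∨ 8 ≤ q.1 ∨ q.2 ≤ 0 ∨ q ∈ board

lemma collision_alt_iff (piece board : List (Int × Int)) (dx dy : Int) :
    collision_alt piece board dx dy = true ↔
      ∃ q ∈ offsetPiece piece dx dy, cellHit board q := by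
  simp [collision_alt, offsetPiece, cellHit, List.any_eq_true]
  constructor
  · rintro ⟨p, hp, h⟩; exact ⟨p, hp, by tauto⟩
  · rintro ⟨p, hp, h⟩; exact ⟨p, hp, by tauto⟩

lemma ite_chain3 {P1 P2 P3 : Prop} [Decidable P1] [Decidable P2] [Decidable P3] :
    ((if P1 then true else if P2 then true else if P3 then true else false) = true) ↔
      P1 ∨ P2 ∨ P3 := by
  split_ifs <;> simp_all

lemma collision_iff (piece board : List (Int × Int)) (dx dy : Int)
    (hne : piece ≠ []) :
    collision piece board dx dy = true ↔
      ∃ q ∈ offsetPiece piece dx dy, cellHit board q := by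
  set s := PySem.List.sorted2 (offsetPiece piece dx dy) Prod.fst Prod.snd with hsdef
  have hperm : s.Perm (offsetPiece piece dx dy) := sorted2_fst_perm _
  have hpair : s.Pairwise (fun a b => a.1 ≤ b.1) := sorted2_fst_pairwise _
  have hsne : s ≠ [] := by
    intro h
    rw [h] at hperm
    exact hne (List.map_eq_nil_iff.mp (hperm.nil_eq).symm)
  have hslen : 0 < s.length := List.length_pos_iff.mpr hsne
  -- head minimises the first component, last maximises it
  have hhead : ∀ q ∈ s, s[0].1 ≤ q.1 := by
    intro q hq
    rcases List.mem_iff_getElem.mp hq with ⟨j, hj, rfl⟩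
    rcases Nat.eq_zero_or_pos j with rfl | hjpos
    · exact le_refl _
    · exact List.pairwise_iff_getElem.mp hpair 0 j hslen hj hjpos
  have hlast : ∀ q ∈ s, q.1 ≤ (s.getLast hsne).1 := by
    intro q hq
    rcases List.mem_iff_getElem.mp hq with ⟨j, hj, rfl⟩
    rw [List.getLast_eq_getElem]
    rcases Nat.lt_or_ge j (s.length - 1) with hlt | hge
    · exact List.pairwise_iff_getElem.mp hpair j (s.length - 1) hj (by omega) hlt
    · have : j = s.length - 1 := by omega
      subst this; exact le_refl _
  -- evaluate the two indexings
  have hget0 : PySem.List.pyGet? s 0 = some s[0] := by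
    rw [PySem.List.pyGet?_zero]; exact List.getElem?_eq_getElem hslen
  have hgetm1 : PySem.List.pyGet? s (-1) = some (s.getLast hsne) := by
    rw [PySem.List.pyGet?_neg_one]; exact List.getLast?_eq_getLast hsne
  -- the min over the second components
  obtain ⟨m, hm⟩ : ∃ m, PySem.List.min? (s.map (fun p => p.2)) (fun y => y) = some m := by
    cases hcase : PySem.List.min? (s.map (fun p => p.2)) (fun y => y) with
    | none =>
      exfalso
      exact hsne (List.map_eq_nil_iff.mp ((PySem.List.min?_eq_none_iff _ _).mp hcase))
    | some m => exact ⟨m, rfl⟩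
  have hmmem : m ∈ s.map (fun p => p.2) := PySem.List.min?_mem hm
  have hmmin : ∀ y ∈ s.map (fun p => p.2), m ≤ y := by
    intro y hy; exact PySem.List.min?_isMin hm y hy
  -- reduce the port to the four-way disjunction
  rw [collision]
  simp only [← hsdef, hget0, hgetm1, hm]
  rw [ite_chain3]
  have hmemiff : ∀ q : Int × Int, q ∈ s ↔ q ∈ offsetPiece piece dx dy :=
    fun q => hperm.mem_iff
  constructor
  · rintro (h1 | h2 | h3)
    · rcases h1 with h1 | h1
      · exact ⟨s[0], (hmemiff _).mp (List.getElem_mem hslen), Or.inl h1⟩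
      · exact ⟨s.getLast hsne, (hmemiff _).mp (List.getLast_mem hsne), Or.inr (Or.inl h1)⟩
    · rcases List.exists_mem_of_ne_nil _ h2 with ⟨q, hq⟩
      rcases (PySem.Set.mem_inter board (PySem.Set.ofList s) q).mp hq with ⟨hqb, hqs⟩
      exact ⟨q, (hmemiff _).mp ((PySem.Set.mem_ofList s q).mp hqs),
        Or.inr (Or.inr (Or.inr hqb))⟩
    · rcases List.mem_map.mp hmmem with ⟨q, hq, hq2⟩
      exact ⟨q, (hmemiff _).mp hq, Or.inr (Or.inr (Or.inl (by rw [hq2]; exact h3)))⟩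
  · rintro ⟨q, hq, hhit⟩
    have hqs : q ∈ s := (hmemiff q).mpr hq
    rcases hhit with h | h | h | h
    · exact Or.inl (Or.inl (le_trans (hhead q hqs) h))
    · exact Or.inl (Or.inr (le_trans h (hlast q hqs)))
    · exact Or.inr (Or.inr (le_trans (hmmin q.2 (List.mem_map_of_mem hqs)) h))
    · refine Or.inr (Or.inl ?_)
      intro hnil
      have hmem : q ∈ PySem.Set.inter board (PySem.Set.ofList s) :=
        (PySem.Set.mem_inter board (PySem.Set.ofList s) q).mpr
          ⟨h, (PySem.Set.mem_ofList s q).mpr hqs⟩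
      rw [hnil] at hmem
      simp at hmem

theorem collision_spec : Claim_equal_collision := by
  intro piece board dx dy _ hpre
  unfold Spec_collision
  exact Bool.eq_iff_iff.mpr
    ((collision_iff piece board dx dy hpre).trans (collision_alt_iff piece board dx dy).symm)
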